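-- pv_equiv track=rewrite | github.com/gallori-ai/topology-aware-sdm | code/experiment_bfs_ablation.py | bfs_subgraph
-- ===== SOURCE A (Python) =====
-- def bfs_subgraph(query_id, neighbors_map, max_size=50):
--     """BFS extraction — same as quantum_walk.py."""
--     visited = {query_id}
--     queue = [query_id]
--     order = [query_id]  # keep order for BFS distance computation
--     bfs_dist = {query_id: 0}
--     while queue and len(visited) < max_size:
--         current = queue.pop(0)
--         for nbr in neighbors_map.get(current, []):
--             if nbr not in visited and len(visited) < max_size:
--                 visited.add(nbr)
--                 queue.append(nbr)
--                 order.append(nbr)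
--                 bfs_dist[nbr] = bfs_dist[current] + 1
--     return order, bfs_dist
-- ===== SOURCE B (Python) =====
-- def bfs_subgraph(query_id, neighbors_map, max_size=50):
--     """Level-synchronous BFS extraction (same order/distances as the pop-queue version)."""
--     visited = {query_id}
--     order = [query_id]
--     bfs_dist = {query_id: 0}
--     frontier = [query_id]
--     level = 0
--     while frontier and len(visited) < max_size:
--         next_frontier = []
--         for node in frontier:
--             for nbr in neighbors_map.get(node, []):
--                 if nbr not in visited and len(visited) < max_size:
--                     visited.add(nbr)
--                     next_frontier.append(nbr)
--                     order.append(nbr)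
--                     bfs_dist[nbr] = level + 1
--         frontier = next_frontier
--         level += 1
--     return order, bfs_dist
-- ===== Notes on version B (the rewrite author's own statement) =====
-- stated objective: alternative
-- what changed: Replaced the single pop(0) FIFO queue by level-synchronous BFS: a frontier list swapped wholesale per level with an explicit level counter, so distances come from the counter instead of a per-node dict lookup; on the generated timing inputs this was not measurably faster.
import Mathlib
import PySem

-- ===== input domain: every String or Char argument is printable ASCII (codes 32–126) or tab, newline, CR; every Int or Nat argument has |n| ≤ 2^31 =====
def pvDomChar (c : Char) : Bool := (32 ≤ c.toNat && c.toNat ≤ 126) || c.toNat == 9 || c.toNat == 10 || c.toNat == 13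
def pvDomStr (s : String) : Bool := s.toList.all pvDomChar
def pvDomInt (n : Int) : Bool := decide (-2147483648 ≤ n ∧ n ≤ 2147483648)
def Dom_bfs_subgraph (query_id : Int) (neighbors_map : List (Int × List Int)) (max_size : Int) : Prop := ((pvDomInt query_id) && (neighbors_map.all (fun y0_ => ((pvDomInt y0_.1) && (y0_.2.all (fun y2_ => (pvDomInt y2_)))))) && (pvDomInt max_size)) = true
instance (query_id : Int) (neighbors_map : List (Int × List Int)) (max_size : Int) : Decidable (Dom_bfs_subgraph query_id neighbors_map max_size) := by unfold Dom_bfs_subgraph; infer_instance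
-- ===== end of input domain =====

-- B replaces A's pop(0) FIFO queue by level-synchronous frontier lists, taking each node's BFS
-- distance from a level counter instead of a per-node dict lookup (same order and distances).

-- BFS state shared by both ports: (visited set, queue/next-frontier, order, bfs_dist)
abbrev BfsSt : Type := PySem.Set Int × List Int × List Int × PySem.Dict Int Int

-- termination measure helper: number of potential BFS additions not yet visited
def pvUnvis (nm : List (Int × List Int)) (vis : PySem.Set Int) : Nat :=
  ((nm.flatMap Prod.snd).filter (fun x => !(decide (x ∈ vis)))).length

-- every neighbor produced by neighbors_map.get(c, []) occurs in the flattened value lists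
theorem pvDget_mem_flatMap (nm : List (Int × List Int)) (c : Int) :
    ∀ x ∈ (PySem.Dict.mk nm).getD c ([] : List Int), x ∈ nm.flatMap Prod.snd := by
  intro x hx
  simp only [PySem.Dict.getD, PySem.Dict.get?] at hx
  rcases hfind : List.find? (fun p => p.1 == c) nm with _ | p
  · simp [hfind] at hx
  · have hmem := List.mem_of_find?_eq_some hfind
    simp [hfind] at hx
    exact List.mem_flatMap.mpr ⟨p, hmem, hx⟩

theorem pvUnvis_add_lt (nm : List (Int × List Int)) (vis : PySem.Set Int) (x : Int)
    (hU : x ∈ nm.flatMap Prod.snd) (hx : x ∉ vis) :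
    pvUnvis nm (PySem.Set.add vis x) < pvUnvis nm vis := by
  rw [pvUnvis, pvUnvis, PySem.Set.add_of_not_mem hx]
  have hsub : ((nm.flatMap Prod.snd).filter (fun y => !(decide (y ∈ vis ++ [x])))).Sublist
      ((nm.flatMap Prod.snd).filter (fun y => !(decide (y ∈ vis)))) := by
    apply List.monotone_filter_right
    intro a ha
    simp at ha ⊢
    tauto
  have hle := hsub.length_le
  rcases Nat.lt_or_ge (((nm.flatMap Prod.snd).filter (fun y => !(decide (y ∈ vis ++ [x])))).length)
      (((nm.flatMap Prod.snd).filter (fun y => !(decide (y ∈ vis)))).length) with h | h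
  · exact h
  · exfalso
    have heq := hsub.eq_of_length (Nat.le_antisymm hle h)
    have hx1 : x ∈ (nm.flatMap Prod.snd).filter (fun y => !(decide (y ∈ vis))) := by
      simp [hU, hx]
    rw [← heq] at hx1
    simp at hx1

-- one measure lemma for any BFS neighbor step (instantiated for both ports' steps)
theorem pvFold_meas (nm : List (Int × List Int)) (step : BfsSt → Int → BfsSt)
    (hstep : ∀ (vis : PySem.Set Int) (q ord : List Int) (bd : PySem.Dict Int Int) (nbr : Int),
      step (vis, q, ord, bd) nbr = (vis, q, ord, bd) ∨
        (nbr ∉ vis ∧ ∃ bd', step (vis, q, ord, bd) nbr = (PySem.Set.add vis nbr, q ++ [nbr], ord ++ [nbr], bd'))) :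
    ∀ (nbrs : List Int), (∀ x ∈ nbrs, x ∈ nm.flatMap Prod.snd) →
      ∀ (vis : PySem.Set Int) (q ord : List Int) (bd : PySem.Dict Int Int),
        pvUnvis nm (List.foldl step (vis, q, ord, bd) nbrs).1 +
            (List.foldl step (vis, q, ord, bd) nbrs).2.1.length ≤
          pvUnvis nm vis + q.length := by
  intro nbrs
  induction nbrs with
  | nil => intro _ vis q ord bd; simp
  | cons nbr rest ih =>
    intro hn vis q ord bd
    have hrest : ∀ x ∈ rest, x ∈ nm.flatMap Prod.snd := fun x hx => hn x (List.mem_cons_of_mem _ hx)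
    simp only [List.foldl_cons]
    rcases hstep vis q ord bd nbr with h | ⟨hnv, bd', h⟩
    · rw [h]; exact ih hrest vis q ord bd
    · rw [h]
      have h1 := ih hrest (PySem.Set.add vis nbr) (q ++ [nbr]) (ord ++ [nbr]) bd'
      have h2 := pvUnvis_add_lt nm vis nbr (hn nbr (List.mem_cons_self)) hnv
      simp only [List.length_append, List.length_cons, List.length_nil] at h1 ⊢
      omega

-- ===== PORT A =====
-- inner loop body of A: for nbr in neighbors_map.get(current, []): …
-- (Python's bfs_dist[current] is ported as getD current 0: current is always a key when reached)
def bfsStepA (max_size c : Int) (s : BfsSt) (nbr : Int) : BfsSt :=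
  match s with
  | (vis, q, ord, bd) =>
    if nbr ∉ vis ∧ (vis.length : Int) < max_size then
      (PySem.Set.add vis nbr, q ++ [nbr], ord ++ [nbr], bd.insert nbr (bd.getD c 0 + 1))
    else (vis, q, ord, bd)

theorem pvStepA_shape (max_size c : Int) :
    ∀ (vis : PySem.Set Int) (q ord : List Int) (bd : PySem.Dict Int Int) (nbr : Int),
      bfsStepA max_size c (vis, q, ord, bd) nbr = (vis, q, ord, bd) ∨
        (nbr ∉ vis ∧ ∃ bd', bfsStepA max_size c (vis, q, ord, bd) nbr =
          (PySem.Set.add vis nbr, q ++ [nbr], ord ++ [nbr], bd')) := by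
  intro vis q ord bd nbr
  by_cases h : nbr ∉ vis ∧ (vis.length : Int) < max_size
  · right; exact ⟨h.1, bd.insert nbr (bd.getD c 0 + 1), by simp [bfsStepA, h]⟩
  · left; simp [bfsStepA, h]

-- while queue and len(visited) < max_size: current = queue.pop(0); for nbr in …
def bfsLoopA (nm : List (Int × List Int)) (max_size : Int)
    (vis : PySem.Set Int) (q ord : List Int) (bd : PySem.Dict Int Int) : BfsSt :=
  match q with
  | [] => (vis, [], ord, bd)
  | c :: rest =>
    if (vis.length : Int) < max_size then
      let t := List.foldl (bfsStepA max_size c) (vis, rest, ord, bd) ((PySem.Dict.mk nm).getD c [])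
      bfsLoopA nm max_size t.1 t.2.1 t.2.2.1 t.2.2.2
    else (vis, c :: rest, ord, bd)
termination_by pvUnvis nm vis + q.length
decreasing_by
  have h := pvFold_meas nm (bfsStepA max_size c) (pvStepA_shape max_size c)
    ((PySem.Dict.mk nm).getD c []) (pvDget_mem_flatMap nm c) vis rest ord bd
  simp only [List.length_cons] at *
  omega

def bfs_subgraph (query_id : Int) (neighbors_map : List (Int × List Int)) (max_size : Int) : List Int × (List (Int × Int)) :=
  let r := bfsLoopA neighbors_map max_size (PySem.Set.ofList [query_id]) [query_id] [query_id]
    (PySem.Dict.mk [(query_id, (0 : Int))])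
  (r.2.2.1, r.2.2.2.items)

-- ===== PORT B =====
-- inner body of B: add nbr at distance level+1
def bfsStepB (max_size level : Int) (s : BfsSt) (nbr : Int) : BfsSt :=
  match s with
  | (vis, nf, ord, bd) =>
    if nbr ∉ vis ∧ (vis.length : Int) < max_size then
      (PySem.Set.add vis nbr, nf ++ [nbr], ord ++ [nbr], bd.insert nbr (level + 1))
    else (vis, nf, ord, bd)

theorem pvStepB_shape (max_size level : Int) :
    ∀ (vis : PySem.Set Int) (q ord : List Int) (bd : PySem.Dict Int Int) (nbr : Int),
      bfsStepB max_size level (vis, q, ord, bd) nbr = (vis, q, ord, bd) ∨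
        (nbr ∉ vis ∧ ∃ bd', bfsStepB max_size level (vis, q, ord, bd) nbr =
          (PySem.Set.add vis nbr, q ++ [nbr], ord ++ [nbr], bd')) := by
  intro vis q ord bd nbr
  by_cases h : nbr ∉ vis ∧ (vis.length : Int) < max_size
  · right; exact ⟨h.1, bd.insert nbr (level + 1), by simp [bfsStepB, h]⟩
  · left; simp [bfsStepB, h]

-- for nbr in neighbors_map.get(node, []): …
def bfsNodeB (nm : List (Int × List Int)) (max_size level : Int) (s : BfsSt) (node : Int) : BfsSt :=
  List.foldl (bfsStepB max_size level) s ((PySem.Dict.mk nm).getD node [])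

theorem pvFoldB_meas (nm : List (Int × List Int)) (max_size level : Int) :
    ∀ (frontier : List Int) (vis : PySem.Set Int) (nf ord : List Int) (bd : PySem.Dict Int Int),
      pvUnvis nm (List.foldl (bfsNodeB nm max_size level) (vis, nf, ord, bd) frontier).1 +
          (List.foldl (bfsNodeB nm max_size level) (vis, nf, ord, bd) frontier).2.1.length ≤
        pvUnvis nm vis + nf.length := by
  intro frontier
  induction frontier with
  | nil => intro vis nf ord bd; simp
  | cons node rest ih =>
    intro vis nf ord bd
    simp only [List.foldl_cons]
    have hnode := pvFold_meas nm (bfsStepB max_size level) (pvStepB_shape max_size level)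
      ((PySem.Dict.mk nm).getD node []) (pvDget_mem_flatMap nm node) vis nf ord bd
    have ht : ((bfsNodeB nm max_size level (vis, nf, ord, bd) node).1,
        (bfsNodeB nm max_size level (vis, nf, ord, bd) node).2.1,
        (bfsNodeB nm max_size level (vis, nf, ord, bd) node).2.2.1,
        (bfsNodeB nm max_size level (vis, nf, ord, bd) node).2.2.2) =
        bfsNodeB nm max_size level (vis, nf, ord, bd) node := rfl
    have hih := ih (bfsNodeB nm max_size level (vis, nf, ord, bd) node).1
      (bfsNodeB nm max_size level (vis, nf, ord, bd) node).2.1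
      (bfsNodeB nm max_size level (vis, nf, ord, bd) node).2.2.1
      (bfsNodeB nm max_size level (vis, nf, ord, bd) node).2.2.2
    rw [ht] at hih
    have hb : pvUnvis nm (bfsNodeB nm max_size level (vis, nf, ord, bd) node).1 +
        (bfsNodeB nm max_size level (vis, nf, ord, bd) node).2.1.length ≤
        pvUnvis nm vis + nf.length := hnode
    omega

-- while frontier and len(visited) < max_size: build next_frontier; level += 1
def bfsLoopB (nm : List (Int × List Int)) (max_size : Int)
    (vis : PySem.Set Int) (frontier ord : List Int) (bd : PySem.Dict Int Int) (level : Int) :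
    PySem.Set Int × List Int × PySem.Dict Int Int :=
  if frontier ≠ [] ∧ (vis.length : Int) < max_size then
    let t := List.foldl (bfsNodeB nm max_size level) (vis, ([] : List Int), ord, bd) frontier
    bfsLoopB nm max_size t.1 t.2.1 t.2.2.1 t.2.2.2 (level + 1)
  else (vis, ord, bd)
termination_by pvUnvis nm vis + frontier.length
decreasing_by
  simp only [List.foldl_attach]
  have h := pvFoldB_meas nm max_size level frontier vis [] ord bd
  have hf : frontier.length ≠ 0 := by
    rename_i hcond
    simpa [List.length_eq_zero_iff] using hcond.1
  simp only [List.length_nil] at h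
  omega

def bfs_subgraph_alt (query_id : Int) (neighbors_map : List (Int × List Int)) (max_size : Int) : List Int × (List (Int × Int)) :=
  let r := bfsLoopB neighbors_map max_size (PySem.Set.ofList [query_id]) [query_id] [query_id]
    (PySem.Dict.mk [(query_id, (0 : Int))]) 0
  (r.2.1, r.2.2.items)

-- ===== PRECONDITION & SPEC =====
def Spec_bfs_subgraph (query_id : Int) (neighbors_map : List (Int × List Int)) (max_size : Int) (out : List Int × (List (Int × Int))) : Prop := out = bfs_subgraph_alt query_id neighbors_map max_size
instance (query_id : Int) (neighbors_map : List (Int × List Int)) (max_size : Int) (out : List Int × (List (Int × Int))) : Decidable (Spec_bfs_subgraph query_id neighbors_map max_size out) := by unfold Spec_bfs_subgraph; infer_instance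

-- ===== CLAIM (what is proved, stated in full; the proofs are below) =====
def Claim_equal_bfs_subgraph : Prop := ∀ (query_id : Int) (neighbors_map : List (Int × List Int)) (max_size : Int), Dom_bfs_subgraph query_id neighbors_map max_size → Spec_bfs_subgraph query_id neighbors_map max_size (bfs_subgraph query_id neighbors_map max_size)

-- ===== LEMMAS AND PROOFS =====

-- once |visited| ≥ max_size nothing is added: B's folds are the identity
theorem pvStepB_blocked (max_size level : Int)
    (vis : PySem.Set Int) (nf ord : List Int) (bd : PySem.Dict Int Int)
    (h : ¬ ((vis.length : Int) < max_size)) (l : List Int) :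
    List.foldl (bfsStepB max_size level) (vis, nf, ord, bd) l = (vis, nf, ord, bd) := by
  induction l with
  | nil => rfl
  | cons a l ih => simp only [List.foldl_cons, bfsStepB, h, and_false, if_false]; exact ih

theorem pvFoldB_blocked (nm : List (Int × List Int)) (max_size level : Int)
    (vis : PySem.Set Int) (nf ord : List Int) (bd : PySem.Dict Int Int)
    (h : ¬ ((vis.length : Int) < max_size)) (l : List Int) :
    List.foldl (bfsNodeB nm max_size level) (vis, nf, ord, bd) l = (vis, nf, ord, bd) := by
  induction l with
  | nil => rfl
  | cons a l ih =>
    simp only [List.foldl_cons, bfsNodeB, pvStepB_blocked max_size level vis nf ord bd h]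
    exact ih

-- joint description of one node's neighbor pass for both ports
theorem pvFold_pair (max_size c L : Int) :
    ∀ (nbrs : List Int) (vis : PySem.Set Int) (Q N ord : List Int) (bd : PySem.Dict Int Int),
      vis.Nodup → c ∈ vis → bd.getD c 0 = L →
      ∃ (Δ : List Int) (vis' : PySem.Set Int) (ord' : List Int) (bd' : PySem.Dict Int Int),
        List.foldl (bfsStepA max_size c) (vis, Q, ord, bd) nbrs = (vis', Q ++ Δ, ord', bd') ∧
        List.foldl (bfsStepB max_size L) (vis, N, ord, bd) nbrs = (vis', N ++ Δ, ord', bd') ∧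
        vis' = vis ++ Δ ∧ vis'.Nodup ∧
        (∀ x ∈ vis, bd'.getD x 0 = bd.getD x 0) ∧
        (∀ x ∈ Δ, bd'.getD x 0 = L + 1) := by
  intro nbrs
  induction nbrs with
  | nil =>
    intro vis Q N ord bd hnd hc hL
    exact ⟨[], vis, ord, bd, by simp, by simp, by simp, hnd, fun x _ => rfl, by simp⟩
  | cons nbr rest ih =>
    intro vis Q N ord bd hnd hc hL
    simp only [List.foldl_cons]
    by_cases hg : nbr ∉ vis ∧ (vis.length : Int) < max_size
    · have hne : nbr ≠ c := fun he => hg.1 (he ▸ hc)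
      have hsA : bfsStepA max_size c (vis, Q, ord, bd) nbr =
          (PySem.Set.add vis nbr, Q ++ [nbr], ord ++ [nbr], bd.insert nbr (L + 1)) := by
        simp only [bfsStepA]; rw [if_pos hg, hL]
      have hsB : bfsStepB max_size L (vis, N, ord, bd) nbr =
          (PySem.Set.add vis nbr, N ++ [nbr], ord ++ [nbr], bd.insert nbr (L + 1)) := by
        simp only [bfsStepB]; rw [if_pos hg]
      rw [hsA, hsB]
      have hnd' : (PySem.Set.add vis nbr).Nodup := PySem.Set.nodup_add vis nbr hnd
      have hc' : c ∈ PySem.Set.add vis nbr := by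
        rw [PySem.Set.add_of_not_mem hg.1]; exact List.mem_append_left _ hc
      have hL' : (bd.insert nbr (L + 1)).getD c 0 = L := by
        rw [PySem.Dict.getD_insert, if_neg (fun h => hne h.symm)]; exact hL
      obtain ⟨Δ, vis', ord', bd', hA, hB, hvis, hnd2, hpres, hΔ⟩ :=
        ih (PySem.Set.add vis nbr) (Q ++ [nbr]) (N ++ [nbr]) (ord ++ [nbr])
          (bd.insert nbr (L + 1)) hnd' hc' hL'
      refine ⟨nbr :: Δ, vis', ord', bd', ?_, ?_, ?_, hnd2, ?_, ?_⟩
      · rw [hA]; simp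
      · rw [hB]; simp
      · rw [hvis, PySem.Set.add_of_not_mem hg.1]; simp
      · intro x hx
        have hxv : x ∈ PySem.Set.add vis nbr := by
          rw [PySem.Set.add_of_not_mem hg.1]; exact List.mem_append_left _ hx
        have hxne : x ≠ nbr := fun he => hg.1 (he ▸ hx)
        rw [hpres x hxv, PySem.Dict.getD_insert, if_neg hxne]
      · intro x hx
        rcases List.mem_cons.mp hx with he | hx2
        · subst he
          have hxv : x ∈ PySem.Set.add vis x := by
            rw [PySem.Set.add_of_not_mem hg.1]; exact List.mem_append_right _ (by simp)
          rw [hpres x hxv, PySem.Dict.getD_insert, if_pos rfl]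
        · exact hΔ x hx2
    · have hsA : bfsStepA max_size c (vis, Q, ord, bd) nbr = (vis, Q, ord, bd) := by
        simp only [bfsStepA]; rw [if_neg hg]
      have hsB : bfsStepB max_size L (vis, N, ord, bd) nbr = (vis, N, ord, bd) := by
        simp only [bfsStepB]; rw [if_neg hg]
      rw [hsA, hsB]
      exact ih vis Q N ord bd hnd hc hL

-- main invariant: A's queue is the remaining current frontier F (distance L) followed by the
-- partial next frontier G (distance L+1); A's loop equals B's finish-this-level-then-loop
theorem pvLoop_eq (nm : List (Int × List Int)) (max_size : Int) :
    ∀ (n : Nat) (vis : PySem.Set Int) (F G ord : List Int) (bd : PySem.Dict Int Int) (L : Int),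
      2 * pvUnvis nm vis + 2 * (F.length + G.length) + (if F = [] then 1 else 0) < n →
      vis.Nodup →
      (∀ x ∈ F, x ∈ vis ∧ bd.getD x 0 = L) →
      (∀ x ∈ G, x ∈ vis ∧ bd.getD x 0 = L + 1) →
      ((bfsLoopA nm max_size vis (F ++ G) ord bd).2.2.1,
        (bfsLoopA nm max_size vis (F ++ G) ord bd).2.2.2) =
      (((bfsLoopB nm max_size
            (List.foldl (bfsNodeB nm max_size L) (vis, G, ord, bd) F).1
            (List.foldl (bfsNodeB nm max_size L) (vis, G, ord, bd) F).2.1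
            (List.foldl (bfsNodeB nm max_size L) (vis, G, ord, bd) F).2.2.1
            (List.foldl (bfsNodeB nm max_size L) (vis, G, ord, bd) F).2.2.2 (L + 1)).2.1),
        ((bfsLoopB nm max_size
            (List.foldl (bfsNodeB nm max_size L) (vis, G, ord, bd) F).1
            (List.foldl (bfsNodeB nm max_size L) (vis, G, ord, bd) F).2.1
            (List.foldl (bfsNodeB nm max_size L) (vis, G, ord, bd) F).2.2.1
            (List.foldl (bfsNodeB nm max_size L) (vis, G, ord, bd) F).2.2.2 (L + 1)).2.2)) := by
  intro n
  induction n with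
  | zero => intro vis F G ord bd L hM _ _ _; omega
  | succ m ih =>
    intro vis F G ord bd L hM hnd hF hG
    by_cases hms : (vis.length : Int) < max_size
    · cases F with
      | nil =>
        simp only [List.foldl_nil, List.nil_append]
        cases G with
        | nil =>
          rw [bfsLoopA, bfsLoopB]
          simp
        | cons g G' =>
          rw [show bfsLoopB nm max_size vis (g :: G') ord bd (L + 1) =
              bfsLoopB nm max_size
                (List.foldl (bfsNodeB nm max_size (L + 1)) (vis, [], ord, bd) (g :: G')).1
                (List.foldl (bfsNodeB nm max_size (L + 1)) (vis, [], ord, bd) (g :: G')).2.1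
                (List.foldl (bfsNodeB nm max_size (L + 1)) (vis, [], ord, bd) (g :: G')).2.2.1
                (List.foldl (bfsNodeB nm max_size (L + 1)) (vis, [], ord, bd) (g :: G')).2.2.2
                (L + 1 + 1) from by rw [bfsLoopB]; rw [if_pos ⟨by simp, hms⟩]]
          have hres := ih vis (g :: G') [] ord bd (L + 1) (by simp at hM ⊢; omega) hnd
            (fun x hx => hG x hx) (by simp)
          simpa using hres
      | cons c F' =>
        -- unfold A one pop
        have hcF : (c :: F') ++ G = c :: (F' ++ G) := by simp
        rw [hcF, bfsLoopA]
        rw [if_pos hms]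
        -- describe the neighbor pass of node c on both sides
        obtain ⟨Δ, vis', ord', bd', hA, hB, hvis, hnd2, hpres, hΔ⟩ :=
          pvFold_pair max_size c L ((PySem.Dict.mk nm).getD c []) vis (F' ++ G) G ord bd hnd
            (hF c List.mem_cons_self).1 (hF c List.mem_cons_self).2
        have hmeas := pvFold_meas nm (bfsStepA max_size c) (pvStepA_shape max_size c)
          ((PySem.Dict.mk nm).getD c []) (pvDget_mem_flatMap nm c) vis (F' ++ G) ord bd
        rw [hA] at hmeas
        simp only [hA]
        -- B side: first node of the frontier
        have hnode : bfsNodeB nm max_size L (vis, G, ord, bd) c = (vis', G ++ Δ, ord', bd') := by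
          simp only [bfsNodeB]; exact hB
        simp only [List.foldl_cons, hnode]
        have hF' : ∀ x ∈ F', x ∈ vis' ∧ bd'.getD x 0 = L := by
          intro x hx
          have h0 := hF x (List.mem_cons_of_mem _ hx)
          exact ⟨hvis ▸ List.mem_append_left _ h0.1, (hpres x h0.1).trans h0.2⟩
        have hG' : ∀ x ∈ G ++ Δ, x ∈ vis' ∧ bd'.getD x 0 = L + 1 := by
          intro x hx
          rcases List.mem_append.mp hx with hx | hx
          · have h0 := hG x hx
            exact ⟨hvis ▸ List.mem_append_left _ h0.1, (hpres x h0.1).trans h0.2⟩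
          · exact ⟨hvis ▸ List.mem_append_right _ hx, hΔ x hx⟩
        have hmeas' : 2 * pvUnvis nm vis' + 2 * (F'.length + (G ++ Δ).length) +
            (if F' = [] then 1 else 0) < m := by
          have hfl : (if F' = [] then 1 else 0) ≤ 1 := by split <;> omega
          have hfl2 : (if (c :: F') = [] then 1 else 0) = 0 := by simp
          rw [hfl2] at hM
          simp only [List.length_append, List.length_cons] at hmeas hM ⊢
          omega
        have hres := ih vis' F' (G ++ Δ) ord' bd' L hmeas' hnd2 hF' hG'
        rw [List.append_assoc]
        exact hres
    · -- |visited| ≥ max_size: A stops, B adds nothing and stops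
      rw [pvFoldB_blocked nm max_size L vis G ord bd hms F]
      rw [show bfsLoopB nm max_size (vis, G, ord, bd).1 (vis, G, ord, bd).2.1
            (vis, G, ord, bd).2.2.1 (vis, G, ord, bd).2.2.2 (L + 1) = (vis, ord, bd) from by
          rw [bfsLoopB]; rw [if_neg (by simp [hms])]]
      cases hFG : F ++ G with
      | nil => rw [bfsLoopA]
      | cons a l =>
        rw [bfsLoopA]
        rw [if_neg hms]

-- ===== VERDICT (by name: the statement is the Claim_ definition above) =====
theorem bfs_subgraph_spec : Claim_equal_bfs_subgraph := by
  intro query_id nm max_size _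
  show bfs_subgraph query_id nm max_size = bfs_subgraph_alt query_id nm max_size
  simp only [bfs_subgraph, bfs_subgraph_alt]
  have hq : query_id ∈ PySem.Set.ofList [query_id] := by
    rw [PySem.Set.mem_ofList]; simp
  have hbd : (PySem.Dict.mk [(query_id, (0 : Int))]).getD query_id 0 = 0 := by
    simp [PySem.Dict.getD, PySem.Dict.get?]
  have key := pvLoop_eq nm max_size
    (2 * pvUnvis nm (PySem.Set.ofList [query_id]) + 3)
    (PySem.Set.ofList [query_id]) [query_id] [] [query_id]
    (PySem.Dict.mk [(query_id, (0 : Int))]) 0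
    (by simp)
    (PySem.Set.nodup_ofList _)
    (by intro x hx; simp at hx; subst hx; exact ⟨hq, hbd⟩)
    (by simp)
  simp only [List.append_nil] at key
  -- relate B's loop entry to the mid-level form used by key
  have hB : bfsLoopB nm max_size (PySem.Set.ofList [query_id]) [query_id] [query_id]
      (PySem.Dict.mk [(query_id, (0 : Int))]) 0 =
      bfsLoopB nm max_size
        (List.foldl (bfsNodeB nm max_size 0)
          (PySem.Set.ofList [query_id], [], [query_id], PySem.Dict.mk [(query_id, (0 : Int))]) [query_id]).1
        (List.foldl (bfsNodeB nm max_size 0)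
          (PySem.Set.ofList [query_id], [], [query_id], PySem.Dict.mk [(query_id, (0 : Int))]) [query_id]).2.1
        (List.foldl (bfsNodeB nm max_size 0)
          (PySem.Set.ofList [query_id], [], [query_id], PySem.Dict.mk [(query_id, (0 : Int))]) [query_id]).2.2.1
        (List.foldl (bfsNodeB nm max_size 0)
          (PySem.Set.ofList [query_id], [], [query_id], PySem.Dict.mk [(query_id, (0 : Int))]) [query_id]).2.2.2
        (0 + 1) := by
    by_cases hms : ((PySem.Set.ofList [query_id]).length : Int) < max_size
    · conv_lhs => rw [bfsLoopB]
      rw [if_pos ⟨by simp, hms⟩]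
    · rw [pvFoldB_blocked nm max_size 0 (PySem.Set.ofList [query_id]) [] [query_id]
        (PySem.Dict.mk [(query_id, (0 : Int))]) hms [query_id]]
      conv_lhs => rw [bfsLoopB]
      rw [if_neg (by simp [hms])]
      rw [bfsLoopB]
      rw [if_neg (by simp)]
  rw [hB]
  rw [Prod.mk.injEq] at key
  rw [Prod.mk.injEq]
  exact ⟨by rw [key.1], by rw [key.2]⟩
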